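-- pv_equiv track=rewrite | github.com/bengdahl/advent-of-code-2019 | day-16/part-2.py | phase
-- ===== SOURCE A (Python) =====
-- def phase(data):
--     result = []
--     p_sum = sum(data)
--     for i in range(len(data)):
--         t = p_sum
--         p_sum -= data[i]
--         result.append(abs(t) % 10)
--     return result
-- ===== SOURCE B (Python) =====
-- def phase(data):
--     # Each output digit is abs(suffix sum) % 10, computed from scratch per index.
--     return [abs(sum(data[i:])) % 10 for i in range(len(data))]
-- ===== Notes on version B (the rewrite author's own statement) =====
-- stated objective: simpler
-- what changed: replaced A's single-pass running-suffix-sum accumulator loop with a one-line comprehension that recomputes each suffix sum data[i:] from scratch per output index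
import Mathlib
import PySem

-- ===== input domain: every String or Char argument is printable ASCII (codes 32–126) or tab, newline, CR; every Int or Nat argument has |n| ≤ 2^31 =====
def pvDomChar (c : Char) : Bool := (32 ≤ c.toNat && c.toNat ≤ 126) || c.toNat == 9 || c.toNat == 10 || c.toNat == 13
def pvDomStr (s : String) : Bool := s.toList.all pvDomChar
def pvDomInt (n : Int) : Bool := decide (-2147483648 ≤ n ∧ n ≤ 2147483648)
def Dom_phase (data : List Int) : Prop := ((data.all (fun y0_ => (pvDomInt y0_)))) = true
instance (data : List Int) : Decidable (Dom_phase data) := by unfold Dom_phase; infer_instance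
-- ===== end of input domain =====

-- B replaces A's running-suffix-sum accumulator loop by recomputing each suffix sum data[i:] from scratch (simpler one-liner, not faster).


-- ===== PORT A =====
-- the loop body: state is (p_sum, result); data[i] with i ∈ range(len(data)) is always in range, so getD is exact
def phaseStep (data : List Int) (st : Int × List Int) (i : Nat) : Int × List Int :=
  let t := st.1
  (st.1 - data.getD i 0, st.2 ++ [|t| % 10])

def phase (data : List Int) : List Int :=
  ((List.range data.length).foldl (phaseStep data) (data.sum, [])).2

-- ===== PORT B =====
def phase_alt (data : List Int) : List Int :=
  (List.range data.length).map (fun (i : Nat) => |(PySem.List.slice data (some (i : Int)) none).sum| % 10)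

-- ===== PRECONDITION & SPEC =====
def Spec_phase (data : List Int) (out : List Int) : Prop := out = phase_alt data
instance (data : List Int) (out : List Int) : Decidable (Spec_phase data out) := by unfold Spec_phase; infer_instance

-- ===== CLAIM (what is proved, stated in full; the proofs are below) =====
def Claim_equal_phase : Prop := ∀ (data : List Int), Dom_phase data → Spec_phase data (phase data)

-- ===== LEMMAS AND PROOFS =====
lemma phase_loop (data : List Int) :
    ∀ (m k : Nat) (acc : List Int), k + m ≤ data.length →
    (List.range' k m).foldl (phaseStep data) ((data.drop k).sum, acc)
      = ((data.drop (k + m)).sum,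
         acc ++ (List.range' k m).map (fun i => |(data.drop i).sum| % 10)) := by
  intro m
  induction m with
  | zero => intro k acc _; simp
  | succ m ih =>
    intro k acc hk
    have hklt : k < data.length := by omega
    have hdrop : data.drop k = data[k] :: data.drop (k + 1) :=
      (List.getElem_cons_drop hklt).symm
    have hsum : (data.drop k).sum - data[k] = (data.drop (k + 1)).sum := by
      rw [hdrop, List.sum_cons]; ring
    have hstep : phaseStep data ((data.drop k).sum, acc) k
        = ((data.drop (k + 1)).sum, acc ++ [|(data.drop k).sum| % 10]) := by
      simp only [phaseStep, List.getD_eq_getElem?_getD, List.getElem?_eq_getElem hklt,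
        Option.getD_some, hsum]
    rw [List.range'_succ, List.foldl_cons, hstep, ih (k + 1) _ (by omega)]
    rw [show k + 1 + m = k + (m + 1) from by omega, List.map_cons, List.append_assoc]; rfl

-- ===== VERDICT (by name: the statement is the Claim_ definition above) =====
theorem phase_spec : Claim_equal_phase := by
  intro data _
  show phase data = phase_alt data
  unfold phase phase_alt
  have h := phase_loop data data.length 0 [] (by omega)
  simp only [List.drop_zero] at h
  rw [List.range_eq_range', h]
  simp only [List.nil_append]
  exact (List.map_congr_left (fun i _ => by rw [PySem.List.slice_from_natCast])).symm
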